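-- pv_equiv track=rewrite | github.com/pulinpathneja/edt | app/services/data_ingestion/sample_data_converter.py | _estimate_cost_level
-- ===== SOURCE A (Python) =====
-- def _estimate_cost_level(category: str, title: str, description: str) -> int:
--     """Estimate cost level 1-5."""
--     text = f"{title} {description}".lower()
--     if any(w in text for w in ("free", "no charge")):
--         return 1
--     if category == "restaurant":
--         if any(w in text for w in ("michelin", "luxury", "upscale", "refined", "tasting menu")):
--             return 4
--         if any(w in text for w in ("legendary", "famous", "institution")):
--             return 3
--         if any(w in text for w in ("street food", "market", "stall", "cheap", "budget")):
--             return 1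
--         return 2
--     if category == "shopping":
--         if any(w in text for w in ("luxury", "fashion", "designer", "flagship")):
--             return 4
--         return 2
--     # attraction
--     if any(w in text for w in ("free entry", "free admission")):
--         return 1
--     return 2
-- ===== SOURCE B (Python) =====
-- # Different algorithm: flat keyword->level map per category; collect ALL matched
-- # levels and take their numeric max (default 2). Correct because within each
-- # category the rule priorities (4 > 3 > 1, default 2) coincide with numeric order,
-- # and the attraction "free entry"/"free admission" rules are dead code: any text
-- # containing them contains "free", which already returned 1 at the global check.
-- _KEYWORD_LEVELS = {
--     "restaurant": {
--         "michelin": 4, "luxury": 4, "upscale": 4, "refined": 4, "tasting menu": 4,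
--         "legendary": 3, "famous": 3, "institution": 3,
--         "street food": 1, "market": 1, "stall": 1, "cheap": 1, "budget": 1,
--     },
--     "shopping": {"luxury": 4, "fashion": 4, "designer": 4, "flagship": 4},
-- }
--
-- def _estimate_cost_level(category: str, title: str, description: str) -> int:
--     text = (title + " " + description).lower()
--     if "free" in text or "no charge" in text:
--         return 1
--     matched = [lvl for kw, lvl in _KEYWORD_LEVELS.get(category, {}).items() if kw in text]
--     return max(matched, default=2)
-- ===== Notes on version B (the rewrite author's own statement) =====
-- stated objective: alternative
-- what changed: Instead of an ordered first-match if-chain, B collects every matched keyword's level from a flat keyword->level map and returns their numeric maximum (default 2), exploiting that per-category priorities coincide with numeric order and that the attraction free-entry rules are dead code shadowed by the global 'free' check.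
import Mathlib
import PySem

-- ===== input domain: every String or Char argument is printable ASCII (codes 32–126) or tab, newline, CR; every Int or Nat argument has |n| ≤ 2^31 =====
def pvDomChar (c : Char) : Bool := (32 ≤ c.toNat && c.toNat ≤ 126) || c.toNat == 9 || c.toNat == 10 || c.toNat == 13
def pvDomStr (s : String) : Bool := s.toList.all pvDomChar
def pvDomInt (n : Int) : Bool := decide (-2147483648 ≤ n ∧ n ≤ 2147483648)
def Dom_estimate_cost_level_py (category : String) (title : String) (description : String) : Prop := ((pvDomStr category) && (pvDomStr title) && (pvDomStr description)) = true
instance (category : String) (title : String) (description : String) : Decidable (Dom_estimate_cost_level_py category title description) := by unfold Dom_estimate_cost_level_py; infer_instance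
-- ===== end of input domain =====

-- B replaces A's ordered first-match if-chain by a flat keyword->level map whose MATCHED levels are collected and numerically maximised (default 2); equal return values, different algorithm.


-- ===== PORT A =====
def estimate_cost_level_py (category : String) (title : String) (description : String) : Int :=
  let text := PySem.Str.lower (title ++ " " ++ description)
  if ["free", "no charge"].any (fun w => PySem.Str.isIn w text) then 1
  else if category = "restaurant" then
    if ["michelin", "luxury", "upscale", "refined", "tasting menu"].any (fun w => PySem.Str.isIn w text) then 4
    else if ["legendary", "famous", "institution"].any (fun w => PySem.Str.isIn w text) then 3
    else if ["street food", "market", "stall", "cheap", "budget"].any (fun w => PySem.Str.isIn w text) then 1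
    else 2
  else if category = "shopping" then
    if ["luxury", "fashion", "designer", "flagship"].any (fun w => PySem.Str.isIn w text) then 4
    else 2
  else if ["free entry", "free admission"].any (fun w => PySem.Str.isIn w text) then 1
  else 2

-- ===== PORT B =====
-- B-side data: flat keyword -> level maps per category
def pvRestaurantMap : PySem.Dict String Int :=
  PySem.Dict.ofList
    [("michelin", 4), ("luxury", 4), ("upscale", 4), ("refined", 4), ("tasting menu", 4),
     ("legendary", 3), ("famous", 3), ("institution", 3),
     ("street food", 1), ("market", 1), ("stall", 1), ("cheap", 1), ("budget", 1)]
def pvShoppingMap : PySem.Dict String Int :=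
  PySem.Dict.ofList [("luxury", 4), ("fashion", 4), ("designer", 4), ("flagship", 4)]
def pvKeywordLevels : PySem.Dict String (PySem.Dict String Int) :=
  PySem.Dict.ofList [("restaurant", pvRestaurantMap), ("shopping", pvShoppingMap)]

def estimate_cost_level_py_alt (category : String) (title : String) (description : String) : Int :=
  let text := PySem.Str.lower (title ++ " " ++ description)
  if PySem.Str.isIn "free" text || PySem.Str.isIn "no charge" text then 1
  else
    let matched :=
      ((PySem.Dict.getD pvKeywordLevels category PySem.Dict.empty).items.filter
        (fun kl => PySem.Str.isIn kl.1 text)).map Prod.snd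
    match PySem.List.max? matched (fun x => x) with
    | some m => m
    | none => 2

-- ===== PRECONDITION & SPEC =====
def Spec_estimate_cost_level_py (category : String) (title : String) (description : String) (out : Int) : Prop := out = estimate_cost_level_py_alt category title description
instance (category : String) (title : String) (description : String) (out : Int) : Decidable (Spec_estimate_cost_level_py category title description out) := by unfold Spec_estimate_cost_level_py; infer_instance

-- ===== CLAIM =====
def Claim_equal_estimate_cost_level_py : Prop := ∀ (category : String) (title : String) (description : String), Dom_estimate_cost_level_py category title description → Spec_estimate_cost_level_py category title description (estimate_cost_level_py category title description)

-- ===== LEMMAS AND PROOFS =====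
-- a text containing "free entry"/"free admission" contains "free" (prefix of an infix is an infix)
theorem pv_free_shadow (w : String) (text : String)
    (hpre : "free".toList <+: w.toList)
    (h : PySem.Str.isIn w text = true) : PySem.Str.isIn "free" text = true := by
  rw [PySem.Str.isIn_iff_infix] at h ⊢
  exact hpre.isInfix.trans h

-- filter over an explicit cons as a linear append (avoids the exponential if-tree of filter_cons)
theorem pv_filter_cons_append {α : Type} (p : α → Bool) (x : α) (xs : List α) :
    List.filter p (x :: xs) = (if p x then [x] else []) ++ List.filter p xs := by
  by_cases h : p x = true <;> simp [h]

-- ===== VERDICT =====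
set_option maxHeartbeats 4000000 in
theorem estimate_cost_level_py_spec : Claim_equal_estimate_cost_level_py := by
  intro category title description _
  unfold Spec_estimate_cost_level_py estimate_cost_level_py estimate_cost_level_py_alt
  generalize PySem.Str.lower (title ++ " " ++ description) = text
  dsimp only
  by_cases hr : category = "restaurant"
  · subst hr
    rw [show (PySem.Dict.getD pvKeywordLevels "restaurant" PySem.Dict.empty).items
        = [("michelin", (4:Int)), ("luxury", 4), ("upscale", 4), ("refined", 4), ("tasting menu", 4),
           ("legendary", 3), ("famous", 3), ("institution", 3),
           ("street food", 1), ("market", 1), ("stall", 1), ("cheap", 1), ("budget", 1)] from rfl,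
       if_pos (show ("restaurant" : String) = "restaurant" from rfl)]
    simp only [List.any_cons, List.any_nil, Bool.or_false, pv_filter_cons_append, List.filter_nil,
      List.map_append, apply_ite (List.map (Prod.snd (α := String) (β := Int))),
      List.map_cons, List.map_nil, List.append_nil]
    generalize PySem.Str.isIn "free" text = b1
    generalize PySem.Str.isIn "no charge" text = b2
    generalize PySem.Str.isIn "michelin" text = b3
    generalize PySem.Str.isIn "luxury" text = b4
    generalize PySem.Str.isIn "upscale" text = b5
    generalize PySem.Str.isIn "refined" text = b6
    generalize PySem.Str.isIn "tasting menu" text = b7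
    generalize PySem.Str.isIn "legendary" text = b8
    generalize PySem.Str.isIn "famous" text = b9
    generalize PySem.Str.isIn "institution" text = b10
    generalize PySem.Str.isIn "street food" text = b11
    generalize PySem.Str.isIn "market" text = b12
    generalize PySem.Str.isIn "stall" text = b13
    generalize PySem.Str.isIn "cheap" text = b14
    generalize PySem.Str.isIn "budget" text = b15
    revert b1 b2 b3 b4 b5 b6 b7 b8 b9 b10 b11 b12 b13 b14 b15
    decide
  · by_cases hs : category = "shopping"
    · subst hs
      rw [show (PySem.Dict.getD pvKeywordLevels "shopping" PySem.Dict.empty).items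
          = [("luxury", (4:Int)), ("fashion", 4), ("designer", 4), ("flagship", 4)] from rfl,
         if_neg (show ¬(("shopping" : String) = "restaurant") from by decide),
         if_pos (show ("shopping" : String) = "shopping" from rfl)]
      simp only [List.any_cons, List.any_nil, Bool.or_false, pv_filter_cons_append, List.filter_nil,
        List.map_append, apply_ite (List.map (Prod.snd (α := String) (β := Int))),
        List.map_cons, List.map_nil, List.append_nil]
      generalize PySem.Str.isIn "free" text = b1
      generalize PySem.Str.isIn "no charge" text = b2
      generalize PySem.Str.isIn "luxury" text = b3
      generalize PySem.Str.isIn "fashion" text = b4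
      generalize PySem.Str.isIn "designer" text = b5
      generalize PySem.Str.isIn "flagship" text = b6
      revert b1 b2 b3 b4 b5 b6
      decide
    · have hget : PySem.Dict.getD pvKeywordLevels category PySem.Dict.empty = PySem.Dict.empty := by
        have hD : pvKeywordLevels = PySem.Dict.mk [("restaurant", pvRestaurantMap), ("shopping", pvShoppingMap)] := rfl
        have e1 : (("restaurant" : String) == category) = false := by
          rw [beq_eq_false_iff_ne]; exact fun h => hr h.symm
        have e2 : (("shopping" : String) == category) = false := by
          rw [beq_eq_false_iff_ne]; exact fun h => hs h.symm
        simp [PySem.Dict.getD, hD, e1, e2, PySem.Dict.get?, List.find?_nil]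
      rw [hget, if_neg hr, if_neg hs]
      simp only [List.any_cons, List.any_nil, Bool.or_false]
      by_cases hf : PySem.Str.isIn "free" text = true
      · have hc : (PySem.Str.isIn "free" text || PySem.Str.isIn "no charge" text) = true := by
          rw [hf, Bool.true_or]
        rw [if_pos hc, if_pos hc]
      · have h1 : PySem.Str.isIn "free entry" text = false := by
          cases h : PySem.Str.isIn "free entry" text
          · rfl
          · exact absurd (pv_free_shadow _ _ (by decide) h) hf
        have h2 : PySem.Str.isIn "free admission" text = false := by
          cases h : PySem.Str.isIn "free admission" text
          · rfl
          · exact absurd (pv_free_shadow _ _ (by decide) h) hf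
        split_ifs with hC hD
        · rfl
        · rw [h1, h2] at hD
          exact absurd hD (by decide)
        · rfl
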